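-- pv_equiv track=rewrite | github.com/Alfonso-Fierro/JSSP-Solutions | Búsqueda Local/Código/selection.py | frwrd_insertion
-- ===== SOURCE A (Python) =====
-- def displace_positions(lista, pos1, element):
--     "Permutations"
--     displaced = lista.copy()
--     displaced.remove(element)
--     displaced.insert(pos1,element)
--     return displaced
--
-- def frwrd_insertion(order, activities, activity,):
--     """Insert in elements frwrd"""
--     #All activities are bounded, they cannot be performed
--     #after of before their immediate follower
--     flips = []
--     cpy_activities = order.copy()
--     activity_index = order.index(activity)
--     head           = cpy_activities[activity_index+1:]
--     #First interchange backwards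
--     act = activities[activity]
--     for disp in head:
--         displaced = activities[disp]
--         if displaced[0] != act[0]:
--             displace_index = order.index(disp)
--             flips.append(displace_positions(cpy_activities,displace_index,activity))
--         else:
--             break
--     return flips
-- ===== SOURCE B (Python) =====
-- def frwrd_insertion(order, activities, activity):
--     """Insert in elements frwrd: slide the activity forward by successive
--     adjacent swaps of one evolving permutation, recording a copy after each swap."""
--     perm = order.copy()
--     i = perm.index(activity)
--     act = activities[activity]
--     flips = []
--     while i + 1 < len(perm) and activities[perm[i + 1]][0] != act[0]:
--         perm[i], perm[i + 1] = perm[i + 1], perm[i]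
--         flips.append(perm.copy())
--         i += 1
--     return flips
-- ===== Notes on version B (the rewrite author's own statement) =====
-- stated objective: alternative
-- what changed: A rebuilds each permutation from scratch (copy order, remove the activity, re-find the target with order.index, insert); B instead maintains one evolving permutation and slides the activity forward by successive adjacent swaps, appending a snapshot after each swap, so no per-step remove/insert/index scans remain.
-- outside the precondition, e.g. on frwrd_insertion([1, 2, 1], {1: [0], 2: [5]}, 2): A returns [[2, 1, 1]], B returns [[1, 1, 2]]
import Mathlib
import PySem

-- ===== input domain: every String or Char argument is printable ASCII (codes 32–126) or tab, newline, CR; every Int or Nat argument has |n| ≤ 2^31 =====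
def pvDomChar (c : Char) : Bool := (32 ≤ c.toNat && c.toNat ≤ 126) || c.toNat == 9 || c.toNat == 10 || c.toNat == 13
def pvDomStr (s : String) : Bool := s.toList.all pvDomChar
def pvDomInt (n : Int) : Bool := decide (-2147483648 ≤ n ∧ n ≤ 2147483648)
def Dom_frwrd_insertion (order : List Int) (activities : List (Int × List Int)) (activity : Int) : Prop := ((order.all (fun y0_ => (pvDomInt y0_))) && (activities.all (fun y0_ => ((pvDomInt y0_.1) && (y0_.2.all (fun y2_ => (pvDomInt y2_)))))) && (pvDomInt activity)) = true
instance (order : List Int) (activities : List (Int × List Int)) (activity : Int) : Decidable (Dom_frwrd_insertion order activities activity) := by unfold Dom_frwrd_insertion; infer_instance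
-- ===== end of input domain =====

-- B replaces A's per-target rebuild (copy order, remove activity, order.index, insert) by one
-- evolving permutation slid forward with adjacent swaps, snapshotted after each swap
-- (alternative decomposition, same asymptotic cost).
-- Pre_ additionally excludes inputs where an emitted displacement target duplicates an earlier
-- entry of order, on which A's order.index first-match insertion position is accidental (see cites).


-- dict lookup (first match, per the association-list convention); shared primitive
def pvLookup (activities : List (Int × List Int)) (k : Int) : Option (List Int) :=
  (activities.find? (fun p => p.1 == k)).map (·.2)

-- ===== PORT A =====
-- displace_positions(lista, pos1, element): copy, remove first `element`, insert at pos1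
def pvDisplace (lista : List Int) (pos1 : Int) (element : Int) : List Int :=
  match PySem.List.remove? lista element with
  | none => lista            -- ValueError in Python; unreachable under Pre_
  | some d => PySem.List.insert d pos1 element

-- the for-loop over `head` with its break
def pvLoopA (order : List Int) (activities : List (Int × List Int)) (activity : Int)
    (act : List Int) : List Int → List (List Int) → List (List Int)
  | [], flips => flips
  | disp :: rest, flips =>
    match pvLookup activities disp with
    | none => flips          -- KeyError; unreachable under Pre_
    | some displaced =>
      match PySem.List.pyGet? displaced 0, PySem.List.pyGet? act 0 with
      | some d0, some a0 =>
        if d0 ≠ a0 then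
          match PySem.List.index? order disp with
          | none => flips    -- unreachable: disp ∈ order
          | some di =>
            pvLoopA order activities activity act rest
              (flips ++ [pvDisplace order (di : Int) activity])
        else flips           -- break
      | _, _ => flips        -- IndexError; unreachable under Pre_

def frwrd_insertion (order : List Int) (activities : List (Int × List Int)) (activity : Int) : List (List Int) :=
  match PySem.List.index? order activity with
  | none => []               -- ValueError; excluded by Pre_
  | some ai =>
    match pvLookup activities activity with
    | none => []             -- KeyError; excluded by Pre_
    | some act =>
      let head := PySem.List.slice order (some ((ai : Int) + 1)) none
      pvLoopA order activities activity act head []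

-- ===== PORT B =====
-- the while-loop: swap perm[i] and perm[i+1], snapshot, advance i
def pvLoopB (activities : List (Int × List Int)) (act : List Int)
    (perm : List Int) (i : Nat) (flips : List (List Int)) : List (List Int) :=
  if h : i + 1 < perm.length then
    match pvLookup activities (perm[i + 1]'h) with
    | none => flips          -- KeyError; unreachable under Pre_
    | some w =>
      match PySem.List.pyGet? w 0, PySem.List.pyGet? act 0 with
      | some w0, some a0 =>
        if w0 ≠ a0 then
          let perm' := (perm.set i (perm[i + 1]'h)).set (i + 1) (perm[i]'(by omega))
          pvLoopB activities act perm' (i + 1) (flips ++ [perm'])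
        else flips           -- loop condition fails
      | _, _ => flips        -- IndexError; unreachable under Pre_
  else flips
termination_by perm.length - i
decreasing_by simp only [List.length_set]; omega

def frwrd_insertion_alt (order : List Int) (activities : List (Int × List Int)) (activity : Int) : List (List Int) :=
  match PySem.List.index? order activity with
  | none => []               -- ValueError; excluded by Pre_
  | some i =>
    match pvLookup activities activity with
    | none => []             -- KeyError; excluded by Pre_
    | some act => pvLoopB activities act order i []

-- ===== PRECONDITION & SPEC =====
def pvKey? (activities : List (Int × List Int)) (d : Int) : Option Int :=
  (pvLookup activities d).bind (·.head?)
def pvGood (activities : List (Int × List Int)) (d : Int) : Bool :=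
  (pvKey? activities d).isSome
def pvDiffers (activities : List (Int × List Int)) (a0 : Int) (d : Int) : Bool :=
  match pvKey? activities d with
  | some w0 => w0 != a0
  | none => false

-- Pre_ excludes (a) inputs where Python A raises: activity missing from `order` (ValueError) or
-- from `activities` (KeyError), or the scan reaching an element with a missing key / empty value
-- list, or comparing against an empty act (KeyError/IndexError before the break fires); and
-- (b) inputs where some displacement target A emits duplicates an earlier entry of order, on
-- which A's order.index first-match insertion position is accidental (both behaviours defensible;
-- see cites).
def pvPreB (order : List Int) (activities : List (Int × List Int)) (activity : Int) : Bool :=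
  order.contains activity &&
  (match pvLookup activities activity with
   | none => false
   | some act =>
     let suffix := order.drop (order.idxOf activity + 1)
     match act.head? with
     | none => suffix.isEmpty
     | some a0 =>
       match (suffix.dropWhile (pvDiffers activities a0)).head? with
       | none => true
       | some d => pvGood activities d)

-- the emitted window: scanned suffix elements up to the first same-key element
def pvWin (order : List Int) (activities : List (Int × List Int)) (a0 : Int) (i0 : Nat) : List Int :=
  (order.drop (i0 + 1)).takeWhile (pvDiffers activities a0)

-- freshness: each displacement target A actually emits is the FIRST occurrence of its value
def pvFreshB (order : List Int) (activities : List (Int × List Int)) (activity : Int) : Bool :=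
  match pvLookup activities activity with
  | none => true
  | some act =>
    match act.head? with
    | none => true
    | some a0 =>
      let i0 := order.idxOf activity
      let win := pvWin order activities a0 i0
      decide win.Nodup && win.all (fun x => !(order.take (i0 + 1)).contains x)

def Pre_frwrd_insertion (order : List Int) (activities : List (Int × List Int)) (activity : Int) : Prop :=
  pvPreB order activities activity = true ∧ pvFreshB order activities activity = true
instance (order : List Int) (activities : List (Int × List Int)) (activity : Int) : Decidable (Pre_frwrd_insertion order activities activity) := by unfold Pre_frwrd_insertion; infer_instance

def pvWitness_frwrd_insertion : List Int × (List (Int × List Int)) × Int :=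
  ([1, 2, 3], [(1, [0]), (2, [1]), (3, [0])], 1)

def Spec_frwrd_insertion (order : List Int) (activities : List (Int × List Int)) (activity : Int) (out : List (List Int)) : Prop := out = frwrd_insertion_alt order activities activity
instance (order : List Int) (activities : List (Int × List Int)) (activity : Int) (out : List (List Int)) : Decidable (Spec_frwrd_insertion order activities activity out) := by unfold Spec_frwrd_insertion; infer_instance

-- ===== CLAIM (what is proved, stated in full; the proofs are below) =====
def Claim_equal_frwrd_insertion : Prop := ∀ (order : List Int) (activities : List (Int × List Int)) (activity : Int), Dom_frwrd_insertion order activities activity → Pre_frwrd_insertion order activities activity → Spec_frwrd_insertion order activities activity (frwrd_insertion order activities activity)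

-- ===== LEMMAS AND PROOFS =====

theorem pvWitness_ok :
    Dom_frwrd_insertion pvWitness_frwrd_insertion.1 pvWitness_frwrd_insertion.2.1 pvWitness_frwrd_insertion.2.2 ∧
    Pre_frwrd_insertion pvWitness_frwrd_insertion.1 pvWitness_frwrd_insertion.2.1 pvWitness_frwrd_insertion.2.2 := by
  decide

-- common description of both loops' output: successive displacements until the boundary
def pvChain (activities : List (Int × List Int)) (a0 activity : Int)
    (pre : List Int) : List Int → List (List Int)
  | [] => []
  | d :: rest =>
    match pvKey? activities d with
    | none => []
    | some w0 =>
      if w0 = a0 then []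
      else (pre ++ d :: activity :: rest) :: pvChain activities a0 activity (pre ++ [d]) rest

theorem pvKey?_eq (activities : List (Int × List Int)) (d : Int) :
    pvKey? activities d
      = (pvLookup activities d).bind (fun w => PySem.List.pyGet? w 0) := by
  unfold pvKey?
  cases pvLookup activities d with
  | none => rfl
  | some w => simp [PySem.List.pyGet?_zero, List.head?_eq_getElem?]

theorem pvIdx_mid (l1 l2 : List Int) (d : Int) (h : d ∉ l1) :
    (l1 ++ d :: l2).idxOf d = l1.length := by
  rw [List.idxOf_append_of_notMem h, List.idxOf_cons_eq _ rfl]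
  simp

theorem pvIdxOf?_of_mem (l : List Int) (v : Int) (h : v ∈ l) :
    List.idxOf? v l = some (l.idxOf v) := by
  have h2 := List.isSome_idxOf?.mpr h
  cases h3 : List.idxOf? v l with
  | none => simp [h3] at h2
  | some k =>
    have h4 := List.idxOf_eq_getD_idxOf? (l := l) (a := v)
    rw [h3] at h4
    simp [h4]

-- A's loop, over the still-unprocessed suffix, equals pvChain
theorem pvLoopA_chain (pre0 : List Int) (activities : List (Int × List Int))
    (activity a0 : Int) (t : List Int) (hApre : activity ∉ pre0) :
    ∀ (suf done : List Int) (acc : List (List Int)),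
      (suf.takeWhile (pvDiffers activities a0)).Nodup →
      (∀ x ∈ suf.takeWhile (pvDiffers activities a0), x ∉ pre0 ++ activity :: done) →
      pvLoopA (pre0 ++ activity :: (done ++ suf)) activities activity (a0 :: t) suf acc
        = acc ++ pvChain activities a0 activity (pre0 ++ done) suf := by
  intro suf
  induction suf with
  | nil => intro done acc _ _; simp [pvLoopA, pvChain]
  | cons d rest ih =>
    intro done acc hw1 hw2
    cases hk : pvLookup activities d with
    | none =>
      have hkv : pvKey? activities d = none := by rw [pvKey?_eq, hk]; rfl
      simp [pvLoopA, pvChain, hk, hkv]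
    | some w =>
      cases hw : PySem.List.pyGet? w 0 with
      | none =>
        have hkv : pvKey? activities d = none := by rw [pvKey?_eq, hk]; simp [hw]
        simp [pvLoopA, pvChain, hk, hw, hkv]
      | some w0 =>
        have hkv : pvKey? activities d = some w0 := by rw [pvKey?_eq, hk]; simp [hw]
        by_cases heq : w0 = a0
        · subst heq
          simp [pvLoopA, pvChain, hk, hw, hkv]
        · -- emit and recurse
          have hdif : pvDiffers activities a0 d = true := by
            unfold pvDiffers; rw [hkv]; simp [heq]
          have htw : (d :: rest).takeWhile (pvDiffers activities a0)
              = d :: rest.takeWhile (pvDiffers activities a0) := by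
            rw [List.takeWhile_cons_of_pos hdif]
          rw [htw] at hw1 hw2
          have hsplit2 : (pre0 ++ activity :: (done ++ d :: rest))
              = (pre0 ++ activity :: done) ++ d :: rest := by simp
          have hnotpre : d ∉ pre0 ++ activity :: done :=
            hw2 d (List.mem_cons_self)
          have hidx : (pre0 ++ activity :: (done ++ d :: rest)).idxOf d
              = pre0.length + done.length + 1 := by
            rw [hsplit2, pvIdx_mid _ _ _ hnotpre]; simp; omega
          have hmemA : activity ∈ pre0 ++ activity :: (done ++ d :: rest) := by simp
          have hmemD : d ∈ pre0 ++ activity :: (done ++ d :: rest) := by simp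
          have hrem : PySem.List.remove? (pre0 ++ activity :: (done ++ d :: rest)) activity
              = some ((pre0 ++ done) ++ d :: rest) := by
            rw [PySem.List.remove?_eq_some_erase _ _ hmemA,
              List.erase_append_right _ hApre, List.erase_cons_head]
            simp
          have hdisp : pvDisplace (pre0 ++ activity :: (done ++ d :: rest))
              (((pre0.length + done.length + 1 : Nat) : Int)) activity
              = (pre0 ++ done) ++ d :: activity :: rest := by
            have hle : pre0.length + done.length + 1
                ≤ ((pre0 ++ done) ++ d :: rest).length := by simp
            simp only [pvDisplace, hrem]
            rw [PySem.List.insert_natCast _ _ _ hle]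
            have h4 : pre0.length + done.length + 1 = (pre0 ++ done).length + 1 := by simp
            have ht : List.take ((pre0 ++ done).length + 1) ((pre0 ++ done) ++ d :: rest)
                = (pre0 ++ done) ++ [d] := by
              rw [List.take_append]
              simp [List.take_of_length_le]
            have hd : List.drop ((pre0 ++ done).length + 1) ((pre0 ++ done) ++ d :: rest)
                = rest := by
              rw [List.drop_append]
              simp [List.drop_of_length_le]
            rw [h4, ht, hd]
            simp
          have hidx? : List.idxOf? d (pre0 ++ activity :: (done ++ d :: rest))
              = some (pre0.length + done.length + 1) := by
            rw [pvIdxOf?_of_mem _ _ hmemD, hidx]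
          -- one step of the loop
          simp only [pvLoopA, hk, hw, PySem.List.pyGet?_zero_cons]
          rw [if_pos heq, PySem.List.index?_eq_idxOf?]
          simp only [hidx?, hdisp]
          have h5 : (pre0 ++ activity :: (done ++ d :: rest))
              = pre0 ++ activity :: ((done ++ [d]) ++ rest) := by simp
          rw [h5, ih (done ++ [d]) (acc ++ [(pre0 ++ done) ++ d :: activity :: rest])
            hw1.of_cons
            (by
              intro x hx
              have hxold := hw2 x (List.mem_cons_of_mem _ hx)
              have hxd : x ≠ d := fun hxd => (List.nodup_cons.mp hw1).1 (hxd ▸ hx)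
              simp only [List.mem_append, List.mem_cons, List.not_mem_nil] at hxold ⊢
              tauto)]
          simp [pvChain, hkv, if_neg heq]

-- B's loop equals pvChain
theorem pvLoopB_chain (activities : List (Int × List Int)) (activity a0 : Int) (t : List Int) :
    ∀ (suf pre : List Int) (acc : List (List Int)),
      pvLoopB activities (a0 :: t) (pre ++ activity :: suf) pre.length acc
        = acc ++ pvChain activities a0 activity pre suf := by
  intro suf
  induction suf with
  | nil =>
    intro pre acc
    rw [pvLoopB]
    simp [pvChain]
  | cons d rest ih =>
    intro pre acc
    have hlt : pre.length + 1 < (pre ++ activity :: d :: rest).length := by simp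
    have hget1 : (pre ++ activity :: d :: rest)[pre.length + 1]'hlt = d := by
      rw [List.getElem_append_right (by omega)]
      simp
    have hget0 : (pre ++ activity :: d :: rest)[pre.length]'(by omega) = activity := by
      rw [List.getElem_append_right (by omega)]
      simp
    rw [pvLoopB, dif_pos hlt]
    simp only [hget1, hget0]
    cases hk : pvLookup activities d with
    | none =>
      have hkv : pvKey? activities d = none := by rw [pvKey?_eq, hk]; rfl
      simp [pvChain, hkv]
    | some w =>
      cases hw : PySem.List.pyGet? w 0 with
      | none =>
        have hkv : pvKey? activities d = none := by rw [pvKey?_eq, hk]; simp [hw]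
        simp [pvChain, hw, hkv]
      | some w0 =>
        have hkv : pvKey? activities d = some w0 := by rw [pvKey?_eq, hk]; simp [hw]
        by_cases heq : w0 = a0
        · subst heq
          simp [pvChain, hw, hkv]
        · have hset : ((pre ++ activity :: d :: rest).set pre.length d).set (pre.length + 1) activity
              = (pre ++ [d]) ++ activity :: rest := by
            rw [List.set_append, if_neg (by omega), List.set_append, if_neg (by omega)]
            simp
          simp only [hw, PySem.List.pyGet?_zero_cons]
          rw [if_pos heq, hset]
          have hlen : pre.length + 1 = (pre ++ [d]).length := by simp
          rw [hlen, ih (pre ++ [d])]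
          simp [pvChain, hkv, if_neg heq]

-- decompose order at the first occurrence of activity
theorem pvOrder_split (order : List Int) (activity : Int) (h : activity ∈ order) :
    order = order.take (order.idxOf activity) ++
      activity :: order.drop (order.idxOf activity + 1) := by
  have hlt : order.idxOf activity < order.length := List.idxOf_lt_length_of_mem h
  conv_lhs => rw [← List.take_append_drop (order.idxOf activity) order]
  rw [List.drop_eq_getElem_cons hlt, List.getElem_idxOf hlt]

theorem frwrd_insertion_spec : Claim_equal_frwrd_insertion := by
  unfold Claim_equal_frwrd_insertion
  intro order activities activity _ hpre
  unfold Spec_frwrd_insertion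
  obtain ⟨hpreB, hfresh⟩ := hpre
  unfold pvPreB at hpreB
  rw [Bool.and_eq_true] at hpreB
  have hmem : activity ∈ order := List.contains_iff_mem.mp hpreB.1
  have hidx? := pvIdxOf?_of_mem order activity hmem
  set i0 := order.idxOf activity with hi0
  have hsplit := pvOrder_split order activity hmem
  have hlt : i0 < order.length := List.idxOf_lt_length_of_mem hmem
  cases hlk : pvLookup activities activity with
  | none => rw [hlk] at hpreB; simp at hpreB
  | some act =>
    have hlenpre : (order.take i0).length = i0 := by
      simp [List.length_take]; omega
    simp only [frwrd_insertion, frwrd_insertion_alt, PySem.List.index?_eq_idxOf?,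
      hidx?, hlk]
    have hsuf : PySem.List.slice order (some (((i0 : Nat) : Int) + 1)) none
        = order.drop (i0 + 1) := by
      rw [show (((i0 : Nat) : Int) + 1) = (((i0 + 1 : Nat)) : Int) by push_cast; ring,
        PySem.List.slice_from_natCast]
    rw [hsuf]
    cases act with
    | nil =>
      -- empty act: both loops stop immediately or at the first key probe
      cases hdrop : order.drop (i0 + 1) with
      | nil =>
        rw [pvLoopB]
        have : ¬ (i0 + 1 < order.length) := by
          have := congrArg List.length hdrop
          simp at this
          omega
        simp [pvLoopA, this]
      | cons d dr =>
        have hgetd : ∀ (h : i0 + 1 < order.length), order[i0 + 1]'h = d := by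
          intro h
          have : order.drop (i0+1) = order[i0+1] :: order.drop (i0+2) :=
            List.drop_eq_getElem_cons h
          rw [hdrop] at this
          exact (List.cons.injEq _ _ _ _ ▸ this).1.symm
        rw [pvLoopB]
        have hlt2 : i0 + 1 < order.length := by
          have := congrArg List.length hdrop
          simp at this
          omega
        rw [dif_pos hlt2]
        simp only [hgetd hlt2]
        cases hk : pvLookup activities d with
        | none => simp [pvLoopA, hk]
        | some w =>
          simp only [pvLoopA, hk]
          cases hw : PySem.List.pyGet? w 0 with
          | none => simp
          | some w0 => simp [PySem.List.pyGet?, PySem.List.pyIdx?]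
    | cons a0 t =>
      -- main case: both loops equal pvChain over the suffix
      have hB : pvLoopB activities (a0 :: t) order i0 []
          = [] ++ pvChain activities a0 activity (order.take i0) (order.drop (i0 + 1)) := by
        have h7 := pvLoopB_chain activities activity a0 t
          (order.drop (i0 + 1)) (order.take i0) []
        rw [hlenpre, ← hsplit] at h7
        exact h7
      have hApre : activity ∉ order.take i0 := by
        intro hmem2
        have := (List.mem_take_iff_idxOf_lt hmem).mp hmem2
        omega
      have htake : order.take (i0 + 1) = order.take i0 ++ [activity] := by
        rw [List.take_add_one, List.getElem?_eq_getElem hlt, List.getElem_idxOf hlt]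
        rfl
      unfold pvFreshB at hfresh
      rw [hlk] at hfresh
      simp only [List.head?_cons] at hfresh
      rw [Bool.and_eq_true] at hfresh
      have hw1 : ((order.drop (i0 + 1)).takeWhile (pvDiffers activities a0)).Nodup :=
        of_decide_eq_true hfresh.1
      have hw2 : ∀ x ∈ (order.drop (i0 + 1)).takeWhile (pvDiffers activities a0),
          x ∉ order.take i0 ++ activity :: ([] : List Int) := by
        intro x hx
        have := (List.all_eq_true.mp hfresh.2) x hx
        simp only [Bool.not_eq_true', List.contains_eq_mem, decide_eq_false_iff_not] at this
        rw [htake] at this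
        simpa using this
      have hA : pvLoopA order activities activity (a0 :: t) (order.drop (i0 + 1)) []
          = [] ++ pvChain activities a0 activity (order.take i0) (order.drop (i0 + 1)) := by
        have h6 := pvLoopA_chain (order.take i0) activities activity a0 t hApre
          (order.drop (i0 + 1)) [] [] hw1 hw2
        simp only [List.nil_append, List.append_nil] at h6
        rw [← hsplit] at h6
        exact h6
      rw [hA, hB]
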